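-- pv_equiv track=rewrite | github.com/Gilgahex/codeInterviewPrep | seats.py | whatever
-- ===== SOURCE A (Python) =====
-- def whatever(l):
-- 	count = subcount = 0
-- 	for e in l:
-- 		if e == 0:
-- 			subcount+=1
-- 		if e == 1:
-- 			count = max(count,subcount)
-- 			subcount = 0
-- 	if subcount == 0:
-- 		if count%2 ==0:
-- 			return count-2
-- 		else:
-- 			return count-1
-- 	else:
-- 		return count
-- ===== SOURCE B (Python) =====
-- def whatever(l):
--     kept = [e for e in l if e == 0 or e == 1]
--     ones = [i for i, e in enumerate(kept) if e == 1]
--     gaps = [b - a - 1 for a, b in zip([-1] + ones, ones)]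
--     count = max(gaps, default=0)
--     trailing = len(kept) - 1 - (ones[-1] if ones else -1)
--     if trailing == 0:
--         return count - 2 if count % 2 == 0 else count - 1
--     return count
-- ===== Notes on version B (the rewrite author's own statement) =====
-- stated objective: alternative
-- what changed: B replaces A's single stateful scan (running max + zero counter) by a staged pipeline: filter the list to its 0/1 elements, list the positions of the 1s with enumerate, obtain each zero-run length as the gap between consecutive 1-positions via zip, and take one max with default 0; the trailing run is the distance from the last 1 to the end, kept out of the max as in A.
import Mathlib
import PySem

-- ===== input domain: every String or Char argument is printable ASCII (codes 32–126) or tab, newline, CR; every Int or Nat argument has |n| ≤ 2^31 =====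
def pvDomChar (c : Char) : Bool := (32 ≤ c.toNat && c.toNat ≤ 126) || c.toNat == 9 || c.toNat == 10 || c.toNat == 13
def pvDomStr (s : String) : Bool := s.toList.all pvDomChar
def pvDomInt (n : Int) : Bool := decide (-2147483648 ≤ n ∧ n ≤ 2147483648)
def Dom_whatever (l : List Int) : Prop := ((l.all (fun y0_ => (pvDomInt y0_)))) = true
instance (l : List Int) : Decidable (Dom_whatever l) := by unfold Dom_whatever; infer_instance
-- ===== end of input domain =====

-- B replaces A's stateful running-max scan by a staged computation: filter to the 0/1 elements,
-- take the positions of the 1s, derive each zero-run length as a gap between consecutive positions,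
-- and take one max with default 0 (alternative decomposition, same linear cost).

-- ===== PORT A =====
def whateverLoop : List Int → Int → Int → Int × Int
  | [], count, subcount => (count, subcount)
  | e :: t, count, subcount =>
    let subcount := if e = 0 then subcount + 1 else subcount
    if e = 1 then whateverLoop t (max count subcount) 0
    else whateverLoop t count subcount

def whatever (l : List Int) : Int :=
  let p := whateverLoop l 0 0
  if p.2 = 0 then
    if PySem.Int.mod p.1 2 = 0 then p.1 - 2 else p.1 - 1
  else p.1

-- ===== PORT B =====
def whatever_alt (l : List Int) : Int :=
  let kept := l.filter (fun e => e == 0 || e == 1)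
  let ones := ((PySem.List.enumerate kept 0).filter (fun p => p.2 == 1)).map (fun p => p.1)
  let gaps := (List.zip ((-1) :: ones) ones).map (fun p => p.2 - p.1 - 1)
  let count := (PySem.List.max? gaps (fun y => y)).getD 0
  let trailing := (kept.length : Int) - 1 - (ones.getLast?.getD (-1))
  if trailing = 0 then
    if PySem.Int.mod count 2 = 0 then count - 2 else count - 1
  else count

-- ===== PRECONDITION & SPEC =====
def Spec_whatever (l : List Int) (out : Int) : Prop := out = whatever_alt l
instance (l : List Int) (out : Int) : Decidable (Spec_whatever l out) := by unfold Spec_whatever; infer_instance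

-- ===== CLAIM (what is proved, stated in full; the proofs are below) =====
def Claim_equal_whatever : Prop := ∀ (l : List Int), Dom_whatever l → Spec_whatever l (whatever l)

-- ===== LEMMAS AND PROOFS =====

-- proof-side characterisations of A's loop state on a 0/1-only list
def gAux : List Int → Int → Int
  | [], _ => -1
  | e :: t, s => if e = 0 then gAux t (s + 1) else if e = 1 then max s (gAux t 0) else gAux t s

def trAux : List Int → Int → Int
  | [], s => s
  | e :: t, s => if e = 0 then trAux t (s + 1) else if e = 1 then trAux t 0 else trAux t s

def onesOf (k : List Int) : List Int :=
  ((PySem.List.enumerate k 0).filter (fun p => p.2 == 1)).map (fun p => p.1)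

def gapsP : Int → List Int → List Int
  | _, [] => []
  | p, o :: os => (o - p - 1) :: gapsP o os


theorem loop_filter (l : List Int) : ∀ c s,
    whateverLoop l c s = whateverLoop (l.filter (fun e => e == 0 || e == 1)) c s := by
  induction l with
  | nil => intro c s; rfl
  | cons e t ih =>
    intro c s
    by_cases h1 : e = 1
    · simp [whateverLoop, h1, ih]
    · by_cases h0 : e = 0
      · simp [whateverLoop, h0, ih]
      · simp [whateverLoop, h0, h1, ih]

theorem loop_char (k : List Int) : ∀ c s, (∀ x ∈ k, x = 0 ∨ x = 1) → -1 ≤ c →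
    whateverLoop k c s = (max c (gAux k s), trAux k s) := by
  induction k with
  | nil =>
    intro c s _ hc
    simp [whateverLoop, gAux, trAux, max_eq_left hc]
  | cons e t ih =>
    intro c s hk hc
    rcases hk e (by simp) with h0 | h1
    · simp [whateverLoop, gAux, trAux, h0,
        ih c (s + 1) (fun x hx => hk x (List.mem_cons_of_mem _ hx)) hc]
    · have h0 : e ≠ 0 := by omega
      have ht := ih (max c s) 0 (fun x hx => hk x (List.mem_cons_of_mem _ hx))
        (le_trans hc (le_max_left _ _))
      simp [whateverLoop, gAux, trAux, h1, ht, max_assoc]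
theorem gapsP_zip (os : List Int) : ∀ p,
    (List.zip (p :: os) os).map (fun q => q.2 - q.1 - 1) = gapsP p os := by
  induction os with
  | nil => intro p; rfl
  | cons o os ih =>
    intro p
    rw [show (p :: o :: os).zip (o :: os) = (p, o) :: (o :: os).zip os from rfl,
      List.map_cons, ih o]
    rfl

theorem gapsP_map_add_one (os : List Int) : ∀ p,
    gapsP p (os.map (fun x => x + 1)) = gapsP (p - 1) os := by
  induction os with
  | nil => intro p; rfl
  | cons o os ih =>
    intro p
    simp only [List.map, gapsP]
    rw [show (o + 1 : Int) - p - 1 = o - (p - 1) - 1 by omega, ih (o + 1),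
      show (o + 1 : Int) - 1 = o by omega]

theorem enumerate_shift {α : Type} (xs : List α) : ∀ s : Int,
    PySem.List.enumerate xs (s + 1) = (PySem.List.enumerate xs s).map (fun p => (p.1 + 1, p.2)) := by
  induction xs with
  | nil => intro s; simp [PySem.List.enumerate_nil]
  | cons x xs ih => intro s; simp [PySem.List.enumerate_cons, ih (s + 1)]

theorem onesOf_cons (e : Int) (t : List Int) :
    onesOf (e :: t) = if e = 1 then (0 : Int) :: (onesOf t).map (fun x => x + 1)
                      else (onesOf t).map (fun x => x + 1) := by
  unfold onesOf
  rw [PySem.List.enumerate_cons, show (0 : Int) + 1 = 0 + 1 from rfl, enumerate_shift]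
  by_cases h1 : e = 1 <;>
    simp [h1, List.filter_map, List.map_map, Function.comp_def]
theorem onesOf_nonneg (k : List Int) : ∀ x ∈ onesOf k, 0 ≤ x := by
  induction k with
  | nil => intro x hx; simp [onesOf, PySem.List.enumerate_nil] at hx
  | cons e t ih =>
    intro x hx
    rw [onesOf_cons] at hx
    by_cases h1 : e = 1
    · rw [if_pos h1] at hx
      rcases List.mem_cons.mp hx with rfl | hx
      · omega
      · obtain ⟨y, hy, rfl⟩ := List.mem_map.mp hx
        have := ih y hy; omega
    · rw [if_neg h1] at hx
      obtain ⟨y, hy, rfl⟩ := List.mem_map.mp hx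
      have := ih y hy; omega

theorem gAux_char (k : List Int) : ∀ s, (∀ x ∈ k, x = 0 ∨ x = 1) →
    gAux k s = (gapsP (-1 - s) (onesOf k)).foldr max (-1) := by
  induction k with
  | nil => intro s _; simp [gAux, onesOf, PySem.List.enumerate_nil, gapsP]
  | cons e t ih =>
    intro s hk
    rcases hk e (by simp) with h0 | h1
    · rw [onesOf_cons, if_neg (by omega : e ≠ 1)]
      rw [show gAux (e :: t) s = gAux t (s + 1) by simp [gAux, h0]]
      rw [ih (s + 1) (fun x hx => hk x (List.mem_cons_of_mem _ hx)), gapsP_map_add_one,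
        show (-1 - s - 1 : Int) = -1 - (s + 1) by omega]
    · have h0 : e ≠ 0 := by omega
      rw [onesOf_cons, if_pos h1]
      rw [show gAux (e :: t) s = max s (gAux t 0) by simp [gAux, h1]]
      rw [ih 0 (fun x hx => hk x (List.mem_cons_of_mem _ hx))]
      rw [show gapsP (-1 - s) ((0:Int) :: (onesOf t).map (fun x => x + 1))
            = (s :: gapsP 0 ((onesOf t).map (fun x => x + 1))) by
          simp [gapsP]]
      rw [gapsP_map_add_one, show (0 : Int) - 1 = -1 - 0 by omega, List.foldr_cons]

theorem trAux_char (k : List Int) : ∀ s, (∀ x ∈ k, x = 0 ∨ x = 1) →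
    trAux k s = (k.length : Int) - 1 - ((onesOf k).getLast?.getD (-1 - s)) := by
  induction k with
  | nil => intro s _; simp [trAux, onesOf, PySem.List.enumerate_nil]
  | cons e t ih =>
    intro s hk
    rcases hk e (by simp) with h0 | h1
    · rw [onesOf_cons, if_neg (by omega : e ≠ 1)]
      rw [show trAux (e :: t) s = trAux t (s + 1) by simp [trAux, h0]]
      rw [ih (s + 1) (fun x hx => hk x (List.mem_cons_of_mem _ hx))]
      cases ht : onesOf t with
      | nil => simp [List.length_cons]; omega
      | cons a as =>
        rw [List.getLast?_map]
        cases hl : (a :: as).getLast? with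
        | none => simp at hl
        | some b => simp [List.length_cons]; omega
    · have h0 : e ≠ 0 := by omega
      rw [onesOf_cons, if_pos h1]
      rw [show trAux (e :: t) s = trAux t 0 by simp [trAux, h1]]
      rw [ih 0 (fun x hx => hk x (List.mem_cons_of_mem _ hx))]
      cases ht : onesOf t with
      | nil => simp [List.length_cons]
      | cons a as =>
        rw [show ((0:Int) :: (a :: as).map (fun x => x + 1)).getLast?
              = ((a :: as).map (fun x => x + 1)).getLast? by
            simp [List.map_cons, List.getLast?_cons_cons]]
        rw [List.getLast?_map]
        cases hl : (a :: as).getLast? with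
        | none => simp at hl
        | some b => simp [List.length_cons]; omega

theorem foldl_max_eq (t : List Int) : ∀ x : Int, -1 ≤ x →
    t.foldl max x = max x (t.foldr max (-1)) := by
  induction t with
  | nil => intro x hx; simp [max_eq_left hx]
  | cons a t ih =>
    intro x hx
    rw [List.foldl_cons, List.foldr_cons, ih (max x a) (le_trans hx (le_max_left _ _)), max_assoc]
theorem whatever_spec : Claim_equal_whatever := by
  intro l _
  unfold Spec_whatever whatever whatever_alt
  have hk : ∀ x ∈ l.filter (fun e => e == 0 || e == 1), x = 0 ∨ x = 1 := by
    intro x hx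
    have := List.of_mem_filter hx
    simp only [Bool.or_eq_true, beq_iff_eq] at this
    exact this
  rw [loop_filter]
  simp only []
  set kept := l.filter (fun e => e == 0 || e == 1) with hkept
  rw [loop_char kept 0 0 hk (by omega)]
  rw [show ((PySem.List.enumerate kept 0).filter (fun p => p.2 == 1)).map (fun p => p.1)
        = onesOf kept from rfl]
  rw [gapsP_zip (onesOf kept) (-1)]
  have hg := gAux_char kept 0 hk
  have htr := trAux_char kept 0 hk
  rw [show (-1 : Int) - 0 = -1 by omega] at hg htr
  rw [hg, htr]
  cases ho : onesOf kept with
  | nil => simp [gapsP, PySem.List.max?]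
  | cons o os =>
    have ho0 : 0 ≤ o := onesOf_nonneg kept o (by rw [ho]; exact List.mem_cons_self)
    rw [show gapsP (-1) (o :: os) = o :: gapsP o os by simp [gapsP]]
    rw [PySem.List.max?_id_cons, Option.getD_some]
    rw [foldl_max_eq (gapsP o os) o (by omega)]
    rw [List.foldr_cons, max_eq_right (le_trans ho0 (le_max_left _ _))]
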